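-- pv_equiv track=rewrite | github.com/sisialt/SoftUni_Fundamentals_Exercise | Functions/More Exercises/05_multiplication_sign.py | find_multiplication
-- ===== SOURCE A (Python) =====
-- def find_multiplication(n1, n2, n3):
--
--     list_nums = [n1, n2, n3]
--     negatives_counter = 0
--
--     for num in list_nums:
--         if num < 0:
--             negatives_counter += 1
--
--     if negatives_counter % 2 == 0:
--         return True
--     else:
--         return False
-- ===== SOURCE B (Python) =====
-- def find_multiplication(n1, n2, n3):
--     # Multiply the unit signs (treating 0 as +1, since A counts only strict negatives)
--     # and test whether the resulting sign is positive.
--     def unit_sign(n):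
--         return -1 if n < 0 else 1
--     return unit_sign(n1) * unit_sign(n2) * unit_sign(n3) > 0
-- ===== Notes on version B (the rewrite author's own statement) =====
-- stated objective: simpler
-- what changed: Replaced the list build and negatives-counting loop with a direct sign computation: map each argument to a unit sign (-1 if negative, else +1), multiply the three signs, and test positivity of the product; no container, no counter, no modulus.
import Mathlib
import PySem

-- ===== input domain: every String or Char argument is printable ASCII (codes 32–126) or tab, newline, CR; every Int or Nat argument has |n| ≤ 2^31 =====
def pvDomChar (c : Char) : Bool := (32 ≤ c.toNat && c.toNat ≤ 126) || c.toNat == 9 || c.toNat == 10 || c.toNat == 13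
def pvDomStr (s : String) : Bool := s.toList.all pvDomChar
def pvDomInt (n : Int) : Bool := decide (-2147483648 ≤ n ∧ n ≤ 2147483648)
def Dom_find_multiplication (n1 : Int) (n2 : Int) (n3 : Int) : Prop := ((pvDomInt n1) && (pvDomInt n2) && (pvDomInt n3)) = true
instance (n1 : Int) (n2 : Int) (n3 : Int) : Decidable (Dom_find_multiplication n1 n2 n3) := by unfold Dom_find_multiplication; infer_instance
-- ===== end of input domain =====

-- B replaces the counting loop by multiplying unit signs and testing positivity (simpler).

-- ===== PORT A =====
def find_multiplication (n1 : Int) (n2 : Int) (n3 : Int) : Bool :=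
  let list_nums : List Int := [n1, n2, n3]
  let negatives_counter : Int :=
    list_nums.foldl (fun acc num => if num < 0 then acc + 1 else acc) 0
  if negatives_counter % 2 == 0 then true else false

-- ===== PORT B =====
def pvUnitSign (n : Int) : Int := if n < 0 then -1 else 1

def find_multiplication_alt (n1 : Int) (n2 : Int) (n3 : Int) : Bool :=
  decide (pvUnitSign n1 * pvUnitSign n2 * pvUnitSign n3 > 0)

-- ===== PRECONDITION & SPEC =====
def Spec_find_multiplication (n1 : Int) (n2 : Int) (n3 : Int) (out : Bool) : Prop := out = find_multiplication_alt n1 n2 n3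
instance (n1 : Int) (n2 : Int) (n3 : Int) (out : Bool) : Decidable (Spec_find_multiplication n1 n2 n3 out) := by unfold Spec_find_multiplication; infer_instance

-- ===== CLAIM =====
def Claim_equal_find_multiplication : Prop := ∀ (n1 : Int) (n2 : Int) (n3 : Int), Dom_find_multiplication n1 n2 n3 → Spec_find_multiplication n1 n2 n3 (find_multiplication n1 n2 n3)

-- ===== LEMMAS AND PROOFS =====

-- ===== VERDICT =====
theorem find_multiplication_spec : Claim_equal_find_multiplication := by
  intro n1 n2 n3 _
  unfold Spec_find_multiplication find_multiplication find_multiplication_alt pvUnitSign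
  simp only [List.foldl]
  rcases lt_or_ge n1 0 with h1 | h1 <;> rcases lt_or_ge n2 0 with h2 | h2 <;>
    rcases lt_or_ge n3 0 with h3 | h3 <;>
      simp [h1, h2, h3, not_lt.mpr]
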